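-- pv_equiv track=rewrite | github.com/zhengzhe19/tl_ea_biz_imp | data_analysis.py | event_map
-- ===== SOURCE A (Python) =====
-- def event_map(seq, cut_position, all_events, label):
--     seq_map = {}
--     if cut_position:
--         for event in all_events:
--             seq_map[event] = sum([1 if x == event else 0 for x in seq[:cut_position]])
--     else:
--         for event in all_events:
--             seq_map[event] = sum([1 if x == event else 0 for x in seq])
--     if label:
--         if isinstance(label, str):
--             seq_map['label'] = 1 if sum([1 if x == label else 0 for x in seq])>0 else 0
--         elif isinstance(label, list):
--             seq_map['label'] = 1 if sum([1 if x in label else 0 for x in seq])>0 else 0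
--     return(seq_map)
-- ===== SOURCE B (Python) =====
-- def event_map(seq, cut_position, all_events, label):
--     seq_map = {e: 0 for e in all_events}
--     prefix = seq[:cut_position] if cut_position else seq
--     for x in prefix:
--         if x in seq_map:
--             seq_map[x] += 1
--     if label:
--         if isinstance(label, str):
--             seq_map['label'] = 1 if label in seq else 0
--         elif isinstance(label, list):
--             seq_map['label'] = 1 if any(x in label for x in seq) else 0
--     return seq_map
-- ===== Notes on version B (the rewrite author's own statement) =====
-- stated objective: faster
-- what changed: Instead of scanning the sequence once per event (one counting pass of seq per all_events entry), B zero-initializes the dict once and makes a single pass over the prefix, incrementing the bucket of each element; the label check becomes a direct membership test.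
import Mathlib
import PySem

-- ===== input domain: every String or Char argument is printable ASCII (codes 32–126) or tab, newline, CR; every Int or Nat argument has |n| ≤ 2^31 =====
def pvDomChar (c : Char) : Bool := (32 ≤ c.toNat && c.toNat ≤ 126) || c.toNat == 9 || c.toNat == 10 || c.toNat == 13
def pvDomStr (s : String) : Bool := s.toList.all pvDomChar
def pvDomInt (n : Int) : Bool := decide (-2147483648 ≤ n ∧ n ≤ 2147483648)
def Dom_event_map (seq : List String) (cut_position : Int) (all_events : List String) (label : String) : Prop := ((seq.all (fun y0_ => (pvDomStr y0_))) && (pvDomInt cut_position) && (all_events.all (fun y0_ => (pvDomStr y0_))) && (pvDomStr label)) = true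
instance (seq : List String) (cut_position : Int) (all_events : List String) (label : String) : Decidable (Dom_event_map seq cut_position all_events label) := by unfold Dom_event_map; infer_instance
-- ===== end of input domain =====

-- B replaces A's per-event scan of the sequence (one full counting pass of seq for every
-- event) by a single pass over the chosen prefix that increments the matching bucket of a
-- zero-initialized dict; objective: faster (O(n*m) → O(n+m)).

-- ===== PORT A =====
def event_map (seq : List String) (cut_position : Int) (all_events : List String) (label : String) : List (String × Int) :=
  let seq_map : PySem.Dict String Int := PySem.Dict.empty
  let seq_map :=
    if cut_position ≠ 0 then
      all_events.foldl (fun d event =>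
        d.insert event (((PySem.List.slice seq none (some cut_position)).map
          (fun x => if x == event then (1 : Int) else 0)).sum)) seq_map
    else
      all_events.foldl (fun d event =>
        d.insert event ((seq.map (fun x => if x == event then (1 : Int) else 0)).sum)) seq_map
  let seq_map :=
    if label ≠ "" then
      -- label is a String here, so Python's isinstance(label, str) branch is the one taken
      seq_map.insert "label"
        (if ((seq.map (fun x => if x == label then (1 : Int) else 0)).sum) > 0 then 1 else 0)
    else seq_map
  seq_map.items

-- ===== PORT B =====
def event_map_alt (seq : List String) (cut_position : Int) (all_events : List String) (label : String) : List (String × Int) :=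
  let seq_map := all_events.foldl (fun d e => d.insert e (0 : Int)) (PySem.Dict.empty : PySem.Dict String Int)
  let pfx := if cut_position ≠ 0 then PySem.List.slice seq none (some cut_position) else seq
  let seq_map := pfx.foldl (fun d x => if d.contains x then d.modify x 0 (· + 1) else d) seq_map
  let seq_map :=
    if label ≠ "" then
      seq_map.insert "label" (if seq.contains label then (1 : Int) else 0)
    else seq_map
  seq_map.items

-- ===== PRECONDITION & SPEC =====
def Spec_event_map (seq : List String) (cut_position : Int) (all_events : List String) (label : String) (out : List (String × Int)) : Prop := out = event_map_alt seq cut_position all_events label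
instance (seq : List String) (cut_position : Int) (all_events : List String) (label : String) (out : List (String × Int)) : Decidable (Spec_event_map seq cut_position all_events label out) := by unfold Spec_event_map; infer_instance

-- ===== CLAIM (what is proved, stated in full; the proofs are below) =====
def Claim_equal_event_map : Prop := ∀ (seq : List String) (cut_position : Int) (all_events : List String) (label : String), Dom_event_map seq cut_position all_events label → Spec_event_map seq cut_position all_events label (event_map seq cut_position all_events label)

-- ===== LEMMAS AND PROOFS =====

-- one-hot sum = count (as Int)
theorem pv_sum_count (l : List String) (e : String) :
    (l.map (fun x => if x == e then (1 : Int) else 0)).sum = (l.count e : Int) := by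
  induction l with
  | nil => simp
  | cons a t ih =>
    simp only [List.map_cons, List.sum_cons, List.count_cons, ih]
    by_cases h : a = e
    · simp [h]; omega
    · simp [h, beq_iff_eq]

-- B's counting loop never changes the key list
theorem pv_keysB (p : List String) (d : PySem.Dict String Int) :
    (p.foldl (fun d x => if d.contains x then d.modify x 0 (· + 1) else d) d).keys = d.keys := by
  induction p generalizing d with
  | nil => rfl
  | cons x t ih =>
    simp only [List.foldl_cons]
    by_cases h : d.contains x = true
    · rw [if_pos h, ih, PySem.Dict.keys_modify,
        PySem.Dict.keys_insert_of_contains _ _ h]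
    · rw [if_neg (by simp_all), ih]

-- value after A's insert loop (insert value depends only on the key)
theorem pv_getDA (l : List String) (f : String → Int) (d : PySem.Dict String Int) (k : String) :
    (l.foldl (fun d e => d.insert e (f e)) d).getD k 0
      = if k ∈ l then f k else d.getD k 0 := by
  induction l generalizing d with
  | nil => simp
  | cons a t ih =>
    simp only [List.foldl_cons, ih, PySem.Dict.getD_insert, List.mem_cons]
    by_cases hk : k ∈ t
    · simp [hk]
    · by_cases ha : k = a <;> simp [hk, ha]

-- value after B's counting loop, for a key the dict contains
theorem pv_getDB (p : List String) (d : PySem.Dict String Int) (k : String)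
    (hk : d.contains k = true) :
    (p.foldl (fun d x => if d.contains x then d.modify x 0 (· + 1) else d) d).getD k 0
      = d.getD k 0 + (p.count k : Int) := by
  induction p generalizing d with
  | nil => simp
  | cons x t ih =>
    simp only [List.foldl_cons]
    by_cases hx : d.contains x = true
    · have hk' : (d.modify x 0 (· + 1)).contains k = true := by
        rw [PySem.Dict.contains_modify]; simp [hk]
      rw [if_pos hx, ih _ hk', PySem.Dict.getD_modify, List.count_cons]
      by_cases h : k = x
      · simp [h]; ring
      · simp [beq_iff_eq, h, Ne.symm h]
    · have hne : k ≠ x := fun e => hx (e ▸ hk)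
      rw [if_neg (by simp_all), ih _ hk, List.count_cons]
      simp [beq_iff_eq, Ne.symm hne]

-- core: A's per-event counting fold equals B's zero-init + single-pass fold
theorem pv_core (p : List String) (all_events : List String) :
    all_events.foldl (fun d e =>
        d.insert e ((p.map (fun x => if x == e then (1 : Int) else 0)).sum)) PySem.Dict.empty
      = p.foldl (fun d x => if d.contains x then d.modify x 0 (· + 1) else d)
          (all_events.foldl (fun d e => d.insert e (0 : Int)) PySem.Dict.empty) := by
  apply PySem.Dict.ext
  have hkA := PySem.Dict.keys_foldl_insert all_events
      (fun _ e => ((p.map (fun x => if x == e then (1 : Int) else 0)).sum)) PySem.Dict.empty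
  have hk0 := PySem.Dict.keys_foldl_insert all_events
      (fun _ _ => (0 : Int)) PySem.Dict.empty
  have hkB := pv_keysB p (all_events.foldl (fun d e => d.insert e (0 : Int)) PySem.Dict.empty)
  have hndA := PySem.Dict.nodup_keys_foldl_insert all_events
      (fun _ e => ((p.map (fun x => if x == e then (1 : Int) else 0)).sum)) PySem.Dict.empty
      (by simp [PySem.Dict.keys_empty])
  have hnd0 := PySem.Dict.nodup_keys_foldl_insert all_events
      (fun _ _ => (0 : Int)) PySem.Dict.empty (by simp [PySem.Dict.keys_empty])
  rw [PySem.Dict.items_eq_map_keys _ hndA 0,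
      PySem.Dict.items_eq_map_keys _ (by rw [hkB]; exact hnd0) 0]
  rw [hkA, hkB, hk0]
  apply List.map_congr_left
  intro k hk
  have hmem : k ∈ all_events := by
    rcases (PySem.Set.mem_update _ _ _).mp hk with h | h
    · simp [PySem.Dict.keys_empty] at h
    · exact h
  have hcont : (all_events.foldl (fun d e => d.insert e (0 : Int)) PySem.Dict.empty).contains k = true := by
    rw [PySem.Dict.contains_eq_decide_mem_keys, hk0]
    simp [PySem.Set.mem_update, hmem]
  congr 1
  rw [pv_getDA, if_pos hmem, pv_sum_count,
      pv_getDB _ _ _ hcont, pv_getDA]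
  simp [hmem]

-- the label values agree: count > 0 iff membership
theorem pv_label (seq : List String) (label : String) :
    (if ((seq.map (fun x => if x == label then (1 : Int) else 0)).sum) > 0 then (1 : Int) else 0)
      = (if seq.contains label then (1 : Int) else 0) := by
  rw [pv_sum_count]
  by_cases h : label ∈ seq
  · simp [h]
  · simp [h, List.count_eq_zero.mpr h]

-- ===== VERDICT (by name: the statement is the Claim_ definition above) =====
theorem event_map_spec : Claim_equal_event_map := by
  intro seq cut_position all_events label _
  unfold Spec_event_map event_map event_map_alt
  dsimp only
  by_cases hc : cut_position ≠ 0
  · rw [if_pos hc, if_pos hc, pv_core (PySem.List.slice seq none (some cut_position))]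
    by_cases hl : label ≠ ""
    · rw [if_pos hl, if_pos hl, pv_label]
    · rw [if_neg hl, if_neg hl]
  · rw [if_neg hc, if_neg hc, pv_core seq]
    by_cases hl : label ≠ ""
    · rw [if_pos hl, if_pos hl, pv_label]
    · rw [if_neg hl, if_neg hl]
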